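-- pv_equiv track=rewrite | github.com/arjavjain21/get-sl-inboxes | smartlead_disconnected_monitor.py | classify_group
-- ===== SOURCE A (Python) =====
-- from typing import List, Dict, Any, Set
--
-- def classify_group(account: Dict[str, Any]) -> str:
--     """
--     Classify account into groups based on tags (CSV string).
--     """
--     raw_tags = account.get("tags") or ""
--     tags = [t.strip().upper() for t in raw_tags.split(",") if t.strip()]
--
--     if any("00VO" in t for t in tags):
--         return "VOLTIC"
--     elif any("00EN" in t for t in tags):
--         return "ENDY"
--     elif any("00SM" in t for t in tags):
--         return "SCALEDMAIL"
--     elif any("00CI" in t for t in tags):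
--         return "CHEAPINBOXES"
--     elif any("00WI" in t for t in tags):
--         return "WINNR"
--     elif any("00IKR" in t for t in tags):
--         return "INBOXKIT"
--     elif any("00PK" in t for t in tags):
--         return "PEEKER"
--     else:
--         return "DEFAULT"
-- ===== SOURCE B (Python) =====
-- MARKERS = [
--     ("00VO", "VOLTIC"),
--     ("00EN", "ENDY"),
--     ("00SM", "SCALEDMAIL"),
--     ("00CI", "CHEAPINBOXES"),
--     ("00WI", "WINNR"),
--     ("00IKR", "INBOXKIT"),
--     ("00PK", "PEEKER"),
-- ]
--
-- def classify_group(account):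
--     raw_tags = account.get("tags") or ""
--     tags = [t.strip().upper() for t in raw_tags.split(",") if t.strip()]
--     best = len(MARKERS)
--     for t in tags:
--         i = 0
--         for m, _lbl in MARKERS:
--             if m in t:
--                 break
--             i += 1
--         best = min(best, i)
--     return MARKERS[best][1] if best < len(MARKERS) else "DEFAULT"
-- ===== Notes on version B (the rewrite author's own statement) =====
-- stated objective: alternative
-- what changed: Replaces A's seven sequential any(...) scans over the tag list (one per marker) with a single tag-major pass that resolves each tag to its earliest matching marker index and keeps the running minimum, then indexes an ordered marker-to-label table.
import Mathlib
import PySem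

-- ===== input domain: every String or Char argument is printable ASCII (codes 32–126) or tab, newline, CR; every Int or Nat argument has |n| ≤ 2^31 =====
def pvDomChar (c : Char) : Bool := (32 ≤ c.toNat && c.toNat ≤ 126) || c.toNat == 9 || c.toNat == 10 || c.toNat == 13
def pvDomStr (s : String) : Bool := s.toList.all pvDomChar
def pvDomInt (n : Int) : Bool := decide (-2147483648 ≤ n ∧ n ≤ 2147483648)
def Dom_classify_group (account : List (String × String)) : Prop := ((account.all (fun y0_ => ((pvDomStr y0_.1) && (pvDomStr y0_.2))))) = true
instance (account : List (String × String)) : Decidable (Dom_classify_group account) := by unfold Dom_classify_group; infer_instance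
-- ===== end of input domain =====

-- B replaces A's seven sequential marker-major any-scans by one tag-major pass keeping the
-- minimal matching marker index over an ordered marker→label table (objective: alternative).

-- shared tag normalization (identical in both Pythons): account.get("tags") or "",
-- then [t.strip().upper() for t in raw.split(",") if t.strip()]
def pvTags (account : List (String × String)) : List String :=
  let raw : String :=
    match (PySem.Dict.mk account).get? "tags" with
    | none => ""
    | some s => if s == "" then "" else s
  let parts : List String :=
    match PySem.Str.split? raw "," with
    | some ps => ps
    | none => []   -- unreachable: the separator "," is nonempty
  (parts.filter (fun t => !(PySem.Str.strip t == ""))).map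
    (fun t => PySem.Str.upper (PySem.Str.strip t))

-- ===== PORT A =====
def classify_group (account : List (String × String)) : String :=
  let tags := pvTags account
  if tags.any (fun t => PySem.Str.isIn "00VO" t) then "VOLTIC"
  else if tags.any (fun t => PySem.Str.isIn "00EN" t) then "ENDY"
  else if tags.any (fun t => PySem.Str.isIn "00SM" t) then "SCALEDMAIL"
  else if tags.any (fun t => PySem.Str.isIn "00CI" t) then "CHEAPINBOXES"
  else if tags.any (fun t => PySem.Str.isIn "00WI" t) then "WINNR"
  else if tags.any (fun t => PySem.Str.isIn "00IKR" t) then "INBOXKIT"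
  else if tags.any (fun t => PySem.Str.isIn "00PK" t) then "PEEKER"
  else "DEFAULT"

-- ===== PORT B =====
def pvMarkers : List (String × String) :=
  [("00VO", "VOLTIC"), ("00EN", "ENDY"), ("00SM", "SCALEDMAIL"), ("00CI", "CHEAPINBOXES"),
   ("00WI", "WINNR"), ("00IKR", "INBOXKIT"), ("00PK", "PEEKER")]

-- the inner loop of Source B: index of the first marker contained in t, or the running count
def pvIdxAux (t : String) : List (String × String) → Nat → Nat
  | [], i => i
  | (m, _) :: rest, i => if PySem.Str.isIn m t then i else pvIdxAux t rest (i + 1)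

def classify_group_alt (account : List (String × String)) : String :=
  let tags := pvTags account
  let best := tags.foldl (fun b t => min b (pvIdxAux t pvMarkers 0)) pvMarkers.length
  if h : best < pvMarkers.length then (pvMarkers[best]'h).2 else "DEFAULT"

-- ===== PRECONDITION & SPEC =====
def Spec_classify_group (account : List (String × String)) (out : String) : Prop := out = classify_group_alt account
instance (account : List (String × String)) (out : String) : Decidable (Spec_classify_group account out) := by unfold Spec_classify_group; infer_instance

-- ===== CLAIM (what is proved, stated in full; the proofs are below) =====
def Claim_equal_classify_group : Prop := ∀ (account : List (String × String)), Dom_classify_group account → Spec_classify_group account (classify_group account)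

-- ===== LEMMAS AND PROOFS =====

-- A's if-chain, generalized over a marker table
def pvChain : List (String × String) → List String → String
  | [], _ => "DEFAULT"
  | (m, l) :: rest, tags =>
      if tags.any (fun t => PySem.Str.isIn m t) then l else pvChain rest tags

-- B's final table lookup, generalized
def pvLabelAt (M : List (String × String)) (b : Nat) : String :=
  if h : b < M.length then (M[b]'h).2 else "DEFAULT"

theorem pvIdxAux_succ (t : String) (M : List (String × String)) (k : Nat) :
    pvIdxAux t M (k + 1) = pvIdxAux t M k + 1 := by
  induction M generalizing k with
  | nil => simp [pvIdxAux]
  | cons p rest ih =>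
      obtain ⟨m, l⟩ := p
      by_cases h : PySem.Chars.isIn m.toList t.toList <;> simp [pvIdxAux, h, ih]

theorem pvFoldMin_le (f : String → Nat) (a : Nat) (l : List String) :
    l.foldl (fun b t => min b (f t)) a ≤ a := by
  induction l generalizing a with
  | nil => simp
  | cons t ts ih =>
      exact le_trans (ih (min a (f t))) (by omega)

theorem pvFoldMin_zero (f : String → Nat) (a : Nat) (l : List String) (t0 : String)
    (hmem : t0 ∈ l) (h0 : f t0 = 0) :
    l.foldl (fun b t => min b (f t)) a = 0 := by
  induction l generalizing a with
  | nil => cases hmem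
  | cons t ts ih =>
      rcases List.mem_cons.mp hmem with h | h
      · subst h
        simp only [List.foldl_cons, h0]
        have := pvFoldMin_le f (min a 0) ts
        omega
      · exact ih _ h

theorem pvFoldMin_congr (f g : String → Nat) (a : Nat) (l : List String)
    (h : ∀ t ∈ l, f t = g t) :
    l.foldl (fun b t => min b (f t)) a = l.foldl (fun b t => min b (g t)) a := by
  induction l generalizing a with
  | nil => rfl
  | cons t ts ih =>
      simp only [List.foldl_cons, h t (List.mem_cons_self ..)]
      exact ih _ (fun x hx => h x (List.mem_cons_of_mem _ hx))

theorem pvFoldMin_shift (f : String → Nat) (a : Nat) (l : List String) :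
    l.foldl (fun b t => min b (f t + 1)) (a + 1)
      = l.foldl (fun b t => min b (f t)) a + 1 := by
  induction l generalizing a with
  | nil => rfl
  | cons t ts ih =>
      simp only [List.foldl_cons]
      have : min (a + 1) (f t + 1) = min a (f t) + 1 := by omega
      rw [this, ih]

theorem pvMain (M : List (String × String)) (tags : List String) :
    pvLabelAt M (tags.foldl (fun b t => min b (pvIdxAux t M 0)) M.length) = pvChain M tags := by
  induction M with
  | nil => simp [pvLabelAt, pvChain]
  | cons p R ih =>
      obtain ⟨m, l⟩ := p
      by_cases h : tags.any (fun t => PySem.Str.isIn m t)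
      · obtain ⟨t0, hmem, ht0⟩ := List.any_eq_true.mp h
        have ht0' : PySem.Chars.isIn m.toList t0.toList = true := by simpa using ht0
        have h0 : pvIdxAux t0 ((m, l) :: R) 0 = 0 := by
          simp [pvIdxAux, ht0']
        rw [pvFoldMin_zero _ _ _ t0 hmem h0]
        simp only [pvChain]
        rw [if_pos h]
        simp [pvLabelAt]
      · have hall : ∀ t ∈ tags, pvIdxAux t ((m, l) :: R) 0 = pvIdxAux t R 0 + 1 := by
          intro t ht
          have hm : PySem.Chars.isIn m.toList t.toList = false := by
            rcases Bool.eq_false_or_eq_true (PySem.Str.isIn m t) with h' | h'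
            · exact absurd (List.any_eq_true.mpr ⟨t, ht, h'⟩) h
            · simpa using h' 
          simp [pvIdxAux, hm, pvIdxAux_succ]
        rw [pvFoldMin_congr _ _ _ _ hall]
        have hlen : ((m, l) :: R).length = R.length + 1 := rfl
        rw [hlen, pvFoldMin_shift]
        have hsucc : ∀ b : Nat, pvLabelAt ((m, l) :: R) (b + 1) = pvLabelAt R b := by
          intro b
          by_cases hb : b < R.length
          · simp [pvLabelAt, hb]
          · simp [pvLabelAt, hb]
        rw [hsucc, ih]
        simp only [pvChain]
        rw [if_neg h]

theorem pvA_eq_chain (account : List (String × String)) :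
    classify_group account = pvChain pvMarkers (pvTags account) := by
  simp only [classify_group, pvChain, pvMarkers]

-- ===== VERDICT (by name: the statement is the Claim_ definition above) =====
theorem classify_group_spec : Claim_equal_classify_group := by
  intro account _
  unfold Spec_classify_group
  rw [pvA_eq_chain]
  exact (pvMain pvMarkers (pvTags account)).symm
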